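-- pv_equiv track=rewrite | github.com/Wendystar0628/Circuit-Design-AI-Assistant | domain/simulation/spice/runtime_compatibility.py | _append_lines_before_end
-- ===== SOURCE A (Python) =====
-- from typing import Dict, Iterable, List, Optional, Sequence, Set, Tuple
--
-- def _append_lines_before_end(lines: Sequence[str], append_lines: Sequence[str]) -> str:
--     materialized = list(lines)
--     if not append_lines:
--         return "\n".join(materialized)
--     inserted = False
--     result: List[str] = []
--     for line in materialized:
--         if line.strip().lower() == ".end" and not inserted:
--             result.extend(append_lines)
--             inserted = True
--         result.append(line)
--     if not inserted:
--         result.extend(append_lines)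
--         result.append(".end")
--     return "\n".join(result)
-- ===== SOURCE B (Python) =====
-- def _append_lines_before_end(lines, append_lines):
--     materialized = list(lines)
--     if not append_lines:
--         return "\n".join(materialized)
--     idx = next((i for i, line in enumerate(materialized)
--                 if line.strip().lower() == ".end"), None)
--     if idx is None:
--         return "\n".join(materialized + list(append_lines) + [".end"])
--     return "\n".join(materialized[:idx] + list(append_lines) + materialized[idx:])
-- ===== Notes on version B (the rewrite author's own statement) =====
-- stated objective: simpler
-- what changed: Replaces the stateful loop with an 'inserted' flag by locating the first '.end' line index and splicing the appended lines in with list slices.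
import Mathlib
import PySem

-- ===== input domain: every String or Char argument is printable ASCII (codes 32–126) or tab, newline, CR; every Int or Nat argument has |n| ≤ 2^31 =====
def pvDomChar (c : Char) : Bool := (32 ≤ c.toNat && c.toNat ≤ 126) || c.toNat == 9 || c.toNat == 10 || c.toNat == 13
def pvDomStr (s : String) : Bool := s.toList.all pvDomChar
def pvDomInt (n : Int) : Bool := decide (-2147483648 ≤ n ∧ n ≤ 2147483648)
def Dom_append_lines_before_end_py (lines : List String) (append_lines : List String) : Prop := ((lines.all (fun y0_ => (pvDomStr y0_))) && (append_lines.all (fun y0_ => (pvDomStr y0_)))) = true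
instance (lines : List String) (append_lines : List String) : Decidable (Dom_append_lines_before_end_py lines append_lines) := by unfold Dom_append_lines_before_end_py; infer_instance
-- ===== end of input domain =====

-- B replaces A's stateful insert-flag loop with locate-first-'.end'-then-splice (simpler decomposition).

-- ===== PORT A =====
-- literal port of A: fold over the lines carrying (inserted, result)
def append_lines_before_end_py (lines : List String) (append_lines : List String) : String :=
  let materialized := lines
  if append_lines.isEmpty then PySem.Str.join "\n" materialized
  else
    let st := materialized.foldl
      (fun (s : Bool × List String) line =>
        if PySem.Str.lower (PySem.Str.strip line) == ".end" && !s.1 then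
          (true, (s.2 ++ append_lines) ++ [line])
        else
          (s.1, s.2 ++ [line]))
      (false, [])
    let result := if !st.1 then (st.2 ++ append_lines) ++ [".end"] else st.2
    PySem.Str.join "\n" result

-- ===== PORT B =====
-- literal port of B: find the index of the first '.end' line, then splice with take/drop
def append_lines_before_end_py_alt (lines : List String) (append_lines : List String) : String :=
  if append_lines.isEmpty then PySem.Str.join "\n" lines
  else
    match lines.findIdx? (fun line => PySem.Str.lower (PySem.Str.strip line) == ".end") with
    | none => PySem.Str.join "\n" (lines ++ append_lines ++ [".end"])
    | some i => PySem.Str.join "\n" (lines.take i ++ append_lines ++ lines.drop i)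

-- ===== PRECONDITION & SPEC =====
def Spec_append_lines_before_end_py (lines : List String) (append_lines : List String) (out : String) : Prop := out = append_lines_before_end_py_alt lines append_lines
instance (lines : List String) (append_lines : List String) (out : String) : Decidable (Spec_append_lines_before_end_py lines append_lines out) := by unfold Spec_append_lines_before_end_py; infer_instance

-- ===== CLAIM (what is proved, stated in full; the proofs are below) =====
def Claim_equal_append_lines_before_end_py : Prop := ∀ (lines : List String) (append_lines : List String), Dom_append_lines_before_end_py lines append_lines → Spec_append_lines_before_end_py lines append_lines (append_lines_before_end_py lines append_lines)

-- ===== LEMMAS AND PROOFS =====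

-- once inserted, the fold just appends every remaining line
theorem pv_loop_true (app : List String) (lines : List String) (acc : List String) :
    lines.foldl
      (fun (s : Bool × List String) line =>
        if PySem.Str.lower (PySem.Str.strip line) == ".end" && !s.1 then
          (true, (s.2 ++ app) ++ [line])
        else
          (s.1, s.2 ++ [line]))
      (true, acc) = (true, acc ++ lines) := by
  induction lines generalizing acc with
  | nil => simp
  | cons h t ih =>
    simp only [List.foldl_cons, Bool.not_true, Bool.and_false, Bool.false_eq_true, if_false]
    rw [ih]; simp

-- the not-yet-inserted fold is characterised by findIdx? on the same predicate
theorem pv_loop_false (app : List String) (lines : List String) (acc : List String) :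
    lines.foldl
      (fun (s : Bool × List String) line =>
        if PySem.Str.lower (PySem.Str.strip line) == ".end" && !s.1 then
          (true, (s.2 ++ app) ++ [line])
        else
          (s.1, s.2 ++ [line]))
      (false, acc) =
    match lines.findIdx? (fun line => PySem.Str.lower (PySem.Str.strip line) == ".end") with
    | none => (false, acc ++ lines)
    | some i => (true, acc ++ lines.take i ++ app ++ lines.drop i) := by
  induction lines generalizing acc with
  | nil => simp
  | cons h t ih =>
    simp only [List.foldl_cons, Bool.not_false, Bool.and_true, List.findIdx?_cons]
    by_cases hp : (PySem.Str.lower (PySem.Str.strip h) == ".end") = true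
    · rw [if_pos hp, if_pos hp, pv_loop_true]
      simp
    · rw [if_neg hp, if_neg hp, ih]
      cases ht : t.findIdx? (fun line => PySem.Str.lower (PySem.Str.strip line) == ".end") with
      | none => simp
      | some i => simp

-- ===== VERDICT (by name: the statement is the Claim_ definition above) =====
theorem append_lines_before_end_py_spec : Claim_equal_append_lines_before_end_py := by
  intro lines append_lines _
  unfold Spec_append_lines_before_end_py append_lines_before_end_py append_lines_before_end_py_alt
  by_cases he : append_lines.isEmpty
  · simp [he]
  · simp only [if_neg he]
    rw [pv_loop_false]
    cases hf : lines.findIdx? (fun line => PySem.Str.lower (PySem.Str.strip line) == ".end") with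
    | none => simp
    | some i => simp
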